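-- pv_equiv track=rewrite | github.com/FGG100y/lc-brain-gym | src/2024E-HWOD/滑动窗口_增强的strstr/script.py | enhanced_strstr
-- ===== SOURCE A (Python) =====
-- def enhanced_strstr(haystack, needle):
--     # 解析带可选段的目标字符串，生成匹配规则
--     def parse_pattern(needle):
--         pattern = []
--         i = 0
--         while i < len(needle):
--             if needle[i] == '[':
--                 j = i + 1
--                 while j < len(needle) and needle[j] != ']':
--                     j += 1
--                 # 提取可选段的字符集合
--                 pattern.append(set(needle[i+1:j]))
--                 i = j + 1
--             else:
--                 pattern.append(needle[i])
--                 i += 1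
--         return pattern
--
--     # 判断源字符串的一段是否匹配解析后的目标字符串
--     def matches(haystack, pattern, start):
--         for i in range(len(pattern)):
--             if isinstance(pattern[i], set):
--                 # 匹配可选段
--                 if haystack[start + i] not in pattern[i]:
--                     return False
--             else:
--                 # 匹配普通字符
--                 if haystack[start + i] != pattern[i]:
--                     return False
--         return True
--
--     # 解析目标字符串
--     pattern = parse_pattern(needle)
--     n = len(haystack)
--     m = len(pattern)
--
--     # 滑动窗口检查匹配
--     for i in range(n - m + 1):
--         if matches(haystack, pattern, i):
--             return i
--
--     return -1
-- ===== SOURCE B (Python) =====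
-- def enhanced_strstr(haystack, needle):
--     # One pass over the needle: literal runs (offset, string) and classes (offset, set).
--     runs = []
--     classes = []
--     lit = []            # pending literal characters
--     cur = None          # None = outside a [...] class; else the set being built
--     m = 0               # number of pattern positions emitted so far
--     for ch in needle:
--         if cur is not None:
--             if ch == ']':
--                 classes.append((m, cur))
--                 m += 1
--                 cur = None
--             else:
--                 cur.add(ch)
--         elif ch == '[':
--             if lit:
--                 runs.append((m - len(lit), ''.join(lit)))
--                 lit = []
--             cur = set()
--         else:
--             lit.append(ch)
--             m += 1
--     if cur is not None:              # unclosed '[' : rest of needle is one class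
--         classes.append((m, cur))
--         m += 1
--     if lit:
--         runs.append((m - len(lit), ''.join(lit)))
--
--     n = len(haystack)
--     if m == 0:
--         return 0
--     start = 0
--     if runs:
--         # anchor the search on the first literal run; verify runs/classes around each hit
--         aoff, astr = runs[0]
--         while start + m <= n:
--             p = haystack.find(astr, start + aoff)
--             if p == -1:
--                 return -1
--             j = p - aoff
--             if j + m > n:
--                 return -1
--             if all(haystack.startswith(s, j + o) for o, s in runs) and \
--                all(haystack[j + o] in cs for o, cs in classes):
--                 return j
--             start = j + 1
--         return -1
--     # no literal at all: every position is a class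
--     while start + m <= n:
--         if all(haystack[start + o] in cs for o, cs in classes):
--             return start
--         start += 1
--     return -1
-- ===== Notes on version B (the rewrite author's own statement) =====
-- stated objective: faster
-- what changed: Replaces A's per-position left-to-right window rescan with an anchored search: one pass parses the needle into literal runs and classes, then the search jumps between candidate windows with str.find on the first literal run (C-level scan) and verifies whole runs with startswith, instead of walking every window character by character.
import Mathlib
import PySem

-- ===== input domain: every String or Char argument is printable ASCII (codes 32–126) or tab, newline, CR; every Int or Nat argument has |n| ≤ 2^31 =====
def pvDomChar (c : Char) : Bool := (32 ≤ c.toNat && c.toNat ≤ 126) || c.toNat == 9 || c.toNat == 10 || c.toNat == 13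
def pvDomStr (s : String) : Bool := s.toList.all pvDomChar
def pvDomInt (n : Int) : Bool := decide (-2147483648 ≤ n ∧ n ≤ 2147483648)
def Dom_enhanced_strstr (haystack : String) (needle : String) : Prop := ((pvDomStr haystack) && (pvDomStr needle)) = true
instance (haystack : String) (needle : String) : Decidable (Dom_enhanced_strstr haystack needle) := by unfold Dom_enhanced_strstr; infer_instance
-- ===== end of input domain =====

-- B replaces A's per-position window rescan by an anchored search: the needle is parsed in one
-- pass into literal runs and character classes, candidate windows are found with str.find on the
-- first literal run and verified run-wise; objective: faster (measured constant-factor).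

-- ===== PORT A =====

-- a pattern element: a plain character or a character class (Python set of chars)
inductive Seg where
  | lit : Char → Seg
  | cls : PySem.Set Char → Seg
deriving Repr, DecidableEq

-- does one pattern element match one character (the two membership tests of A's `matches`)
def segMatch (s : Seg) (c : Char) : Bool :=
  match s with
  | .lit a => c == a
  | .cls st => PySem.Set.contains st c

-- A's inner `while j < len(needle) and needle[j] != ']'` scan: chars before ']' and the rest (starting at ']', or [] if none)
def scanClose : List Char → List Char × List Char
  | [] => ([], [])
  | c :: rest => if c = ']' then ([], c :: rest)
                 else ((scanClose rest).1.cons c, (scanClose rest).2)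

theorem scanClose_snd_length (cs : List Char) : (scanClose cs).2.length ≤ cs.length := by
  induction cs with
  | nil => simp [scanClose]
  | cons c rest ih =>
    by_cases h : c = ']'
    · simp [scanClose, h]
    · simp [scanClose, h]; omega

-- A's parse_pattern (index arithmetic `i = j + 1` becomes dropping the ']' with .tail)
def parseA : List Char → List Seg
  | [] => []
  | c :: rest =>
    if c = '[' then
      Seg.cls (PySem.Set.ofList (scanClose rest).1) :: parseA (scanClose rest).2.tail
    else Seg.lit c :: parseA rest
termination_by cs => cs.length
decreasing_by
  · have h1 := scanClose_snd_length rest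
    have h2 : (scanClose rest).2.tail.length ≤ (scanClose rest).2.length := by
      cases (scanClose rest).2 <;> simp
    simp only [List.length_cons]; omega
  · simp only [List.length_cons]; omega

-- A's `matches(haystack, pattern, start)`; the index start+i is in range at every call site
-- (start ≤ n − m), so the getD default is never read there
def matchesA (hs : List Char) : List Seg → Nat → Bool
  | [], _ => true
  | s :: ps, j => segMatch s (hs.getD j ' ') && matchesA hs ps (j + 1)

def enhanced_strstr (haystack : String) (needle : String) : Int :=
  let hs := haystack.toList
  let pat := parseA needle.toList
  let n : Int := hs.length
  let m : Int := pat.length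
  match (PySem.List.pyRange 0 (n - m + 1) 1).find? (fun i => matchesA hs pat i.toNat) with
  | some i => i
  | none => -1

-- ===== PORT B =====

-- B's one-pass parse of the needle into literal runs (offset, chars) and classes (offset, set);
-- `lit` is the pending literal buffer, `cur` the class being built, `m` the positions emitted.
-- (m ≥ lit.length always holds — every char in `lit` incremented m — so Nat subtraction is exact.)
def parseB2 : List Char → List (Nat × List Char) → List (Nat × PySem.Set Char) →
    List Char → Option (PySem.Set Char) → Nat →
    (List (Nat × List Char) × List (Nat × PySem.Set Char) × Nat)
  | [], runs, classes, lit, cur, m =>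
    match cur with
    | some s =>
        (if lit = [] then runs else runs ++ [(m + 1 - lit.length, lit)],
         classes ++ [(m, s)], m + 1)
    | none =>
        (if lit = [] then runs else runs ++ [(m - lit.length, lit)], classes, m)
  | ch :: rest, runs, classes, lit, cur, m =>
    match cur with
    | some s =>
        if ch = ']' then parseB2 rest runs (classes ++ [(m, s)]) lit none (m + 1)
        else parseB2 rest runs classes lit (some (PySem.Set.add s ch)) m
    | none =>
        if ch = '[' then
          parseB2 rest (if lit = [] then runs else runs ++ [(m - lit.length, lit)])
            classes [] (some PySem.Set.empty) m
        else parseB2 rest runs classes (lit ++ [ch]) none (m + 1)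

-- B's anchored main loop (fuel = n + 1 at entry is a totality guard only: start strictly
-- increases each pass and stays ≤ n − m + 1, so fuel never reaches 0).
-- haystack.startswith(s, j+o) is ported as prefix-of-drop and haystack[j+o] via getD:
-- exact here since j + m ≤ n and every offset is < m.
def anchorLoop (hs : List Char) (runs : List (Nat × List Char))
    (classes : List (Nat × PySem.Set Char)) (m aoff : Nat) (astr : List Char) :
    Nat → Nat → Int
  | 0, _ => -1
  | fuel + 1, start =>
    if start + m ≤ hs.length then
      let p := PySem.Chars.findFrom hs astr ((start + aoff : Nat) : Int) none
      if p = -1 then -1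
      else
        let j := (p - (aoff : Int)).toNat
        if hs.length < j + m then -1
        else if (runs.all (fun r => PySem.Chars.startswith (hs.drop (j + r.1)) r.2) &&
                 classes.all (fun c => PySem.Set.contains c.2 (hs.getD (j + c.1) ' '))) then
          (j : Int)
        else anchorLoop hs runs classes m aoff astr fuel (j + 1)
    else -1

-- B's fallback loop when the needle has no literal character at all (same fuel guard)
def classLoop (hs : List Char) (classes : List (Nat × PySem.Set Char)) (m : Nat) :
    Nat → Nat → Int
  | 0, _ => -1
  | fuel + 1, start =>
    if start + m ≤ hs.length then
      if classes.all (fun c => PySem.Set.contains c.2 (hs.getD (start + c.1) ' ')) then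
        (start : Int)
      else classLoop hs classes m fuel (start + 1)
    else -1

def enhanced_strstr_alt (haystack : String) (needle : String) : Int :=
  let hs := haystack.toList
  let pr := parseB2 needle.toList [] [] [] none 0
  let runs := pr.1
  let classes := pr.2.1
  let m := pr.2.2
  let n := hs.length
  if m = 0 then 0
  else
    match runs with
    | (aoff, astr) :: _ => anchorLoop hs runs classes m aoff astr (n + 1) 0
    | [] => classLoop hs classes m (n + 1) 0

-- ===== PRECONDITION & SPEC =====
def Spec_enhanced_strstr (haystack : String) (needle : String) (out : Int) : Prop := out = enhanced_strstr_alt haystack needle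
instance (haystack : String) (needle : String) (out : Int) : Decidable (Spec_enhanced_strstr haystack needle out) := by unfold Spec_enhanced_strstr; infer_instance

-- ===== CLAIM (what is proved, stated in full; the proofs are below) =====
def Claim_equal_enhanced_strstr : Prop := ∀ (haystack : String) (needle : String), Dom_enhanced_strstr haystack needle → Spec_enhanced_strstr haystack needle (enhanced_strstr haystack needle)

-- ===== LEMMAS AND PROOFS =====

-- the window-match predicate both programs decide
def W (hs : List Char) (pat : List Seg) (j : Nat) : Prop :=
  ∀ k, k < pat.length → segMatch (pat.getD k (Seg.lit ' ')) (hs.getD (j + k) ' ') = true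

theorem matchesA_iff (hs : List Char) (pat : List Seg) :
    ∀ j, matchesA hs pat j = true ↔ W hs pat j := by
  induction pat with
  | nil => intro j; constructor
           · intro _ k hk; simp at hk
           · intro _; simp [matchesA]
  | cons s ps ih =>
    intro j
    constructor
    · intro h k hk
      simp only [matchesA, Bool.and_eq_true] at h
      obtain ⟨h0, hr⟩ := h
      match k, hk with
      | 0, _ => simpa using h0
      | k' + 1, hk =>
        have h2 := (ih (j + 1)).mp hr k' (by simp at hk; omega)
        have e : j + 1 + k' = j + (k' + 1) := by omega
        rw [e] at h2
        simpa using h2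
    · intro hW
      simp only [matchesA, Bool.and_eq_true]
      refine ⟨by simpa using hW 0 (by simp), (ih (j + 1)).mpr ?_⟩
      intro k hk
      have h2 := hW (k + 1) (by simp; omega)
      have e : j + (k + 1) = j + 1 + k := by omega
      rw [e] at h2
      simpa using h2

-- when every window that fits has already been refuted, A's search comes up empty
theorem find_none_end (hs : List Char) (pat : List Seg)
    (hnf : ∀ j : Nat, j + pat.length ≤ hs.length → ¬ W hs pat j) :
    (PySem.List.pyRange 0 ((hs.length : Int) - (pat.length : Int) + 1) 1).find?
      (fun i => matchesA hs pat i.toNat) = none := by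
  apply List.find?_eq_none.mpr
  intro i hi
  obtain ⟨h0, h1⟩ := (PySem.List.mem_pyRange_one).mp hi
  intro hMat
  exact hnf i.toNat (by omega) ((matchesA_iff hs pat i.toNat).mp hMat)

-- B's char-level state machine equals parseA followed by this grouping into runs/classes
def flushR (runs : List (Nat × List Char)) (lit : List Char) (m : Nat) :
    List (Nat × List Char) :=
  if lit = [] then runs else runs ++ [(m - lit.length, lit)]

def groupFold : List Seg → List (Nat × List Char) → List (Nat × PySem.Set Char) →
    List Char → Nat → (List (Nat × List Char) × List (Nat × PySem.Set Char) × Nat)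
  | [], r, cl, lit, m => (flushR r lit m, cl, m)
  | Seg.lit c :: ss, r, cl, lit, m => groupFold ss r cl (lit ++ [c]) (m + 1)
  | Seg.cls s :: ss, r, cl, lit, m =>
      groupFold ss (flushR r lit m) (cl ++ [(m, s)]) [] (m + 1)

theorem parseB2_eq_groupFold : ∀ (n : Nat) (cs : List Char), cs.length ≤ n →
    (∀ r cl lit m, parseB2 cs r cl lit none m = groupFold (parseA cs) r cl lit m) ∧
    (∀ r cl lit m s, parseB2 cs r cl lit (some s) m =
      groupFold (parseA ((scanClose cs).2.tail)) r
        (cl ++ [(m, (scanClose cs).1.foldl PySem.Set.add s)]) lit (m + 1)) := by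
  intro n
  induction n with
  | zero =>
    intro cs h
    have : cs = [] := List.length_eq_zero_iff.mp (Nat.le_zero.mp h)
    subst this
    exact ⟨fun r cl lit m => by simp [parseB2, parseA, groupFold, flushR],
           fun r cl lit m s => by simp [parseB2, parseA, scanClose, groupFold, flushR]⟩
  | succ n ih =>
    intro cs h
    match cs with
    | [] =>
      exact ⟨fun r cl lit m => by simp [parseB2, parseA, groupFold, flushR],
             fun r cl lit m s => by simp [parseB2, parseA, scanClose, groupFold, flushR]⟩
    | c :: rest =>
      have hr : rest.length ≤ n := by simp at h; omega
      obtain ⟨ih1, ih2⟩ := ih rest hr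
      refine ⟨?_, ?_⟩
      · intro r cl lit m
        by_cases hc : c = '['
        · rw [show parseB2 (c :: rest) r cl lit none m
                = parseB2 rest (if lit = [] then r else r ++ [(m - lit.length, lit)])
                    cl [] (some PySem.Set.empty) m from by simp [parseB2, hc]]
          rw [ih2]
          simp [parseA, hc, groupFold, flushR, PySem.Set.ofList_eq_foldl, PySem.Set.empty]
        · rw [show parseB2 (c :: rest) r cl lit none m
                = parseB2 rest r cl (lit ++ [c]) none (m + 1) from by simp [parseB2, hc]]
          rw [ih1]
          simp [parseA, hc, groupFold]
      · intro r cl lit m s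
        by_cases hc : c = ']'
        · rw [show parseB2 (c :: rest) r cl lit (some s) m
                = parseB2 rest r (cl ++ [(m, s)]) lit none (m + 1) from by simp [parseB2, hc]]
          rw [ih1]
          simp [scanClose, hc]
        · rw [show parseB2 (c :: rest) r cl lit (some s) m
                = parseB2 rest r cl lit (some (PySem.Set.add s c)) m from by simp [parseB2, hc]]
          rw [ih2]
          simp [scanClose, hc]

-- the grouped output describes the parsed segment array position by position
theorem groupFold_spec : ∀ (ss segsAll : List Seg) (r : List (Nat × List Char))
    (cl : List (Nat × PySem.Set Char)) (lit : List Char) (m : Nat),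
    lit.length ≤ m →
    segsAll.length = m + ss.length →
    (∀ i, i < ss.length → segsAll.getD (m + i) (Seg.lit ' ') = ss.getD i (Seg.lit ' ')) →
    (∀ p ∈ r, p.2 ≠ [] ∧ p.1 + p.2.length ≤ m - lit.length ∧
       ∀ t, t < p.2.length → segsAll.getD (p.1 + t) (Seg.lit ' ') = Seg.lit (p.2.getD t ' ')) →
    (∀ p ∈ cl, p.1 < m - lit.length ∧ segsAll.getD p.1 (Seg.lit ' ') = Seg.cls p.2) →
    (∀ k, k < m - lit.length →
       (∃ p ∈ r, p.1 ≤ k ∧ k < p.1 + p.2.length) ∨ (∃ p ∈ cl, p.1 = k)) →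
    (∀ t, t < lit.length →
       segsAll.getD (m - lit.length + t) (Seg.lit ' ') = Seg.lit (lit.getD t ' ')) →
    (groupFold ss r cl lit m).2.2 = segsAll.length ∧
    (∀ p ∈ (groupFold ss r cl lit m).1, p.2 ≠ [] ∧ p.1 + p.2.length ≤ segsAll.length ∧
       ∀ t, t < p.2.length → segsAll.getD (p.1 + t) (Seg.lit ' ') = Seg.lit (p.2.getD t ' ')) ∧
    (∀ p ∈ (groupFold ss r cl lit m).2.1,
       p.1 < segsAll.length ∧ segsAll.getD p.1 (Seg.lit ' ') = Seg.cls p.2) ∧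
    (∀ k, k < segsAll.length →
       (∃ p ∈ (groupFold ss r cl lit m).1, p.1 ≤ k ∧ k < p.1 + p.2.length) ∨
       (∃ p ∈ (groupFold ss r cl lit m).2.1, p.1 = k)) := by
  intro ss
  induction ss with
  | nil =>
    intro segsAll r cl lit m hlm hlen hlink hF2 hF3 hF4 hpend
    simp only [groupFold]
    have hlen' : segsAll.length = m := by simpa using hlen
    refine ⟨hlen'.symm, ?_, ?_, ?_⟩
    · intro p hp
      by_cases hl : lit = []
      · simp only [flushR, hl, if_true] at hp
        obtain ⟨h1, h2, h3⟩ := hF2 p hp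
        exact ⟨h1, by omega, h3⟩
      · simp only [flushR, hl, if_false] at hp
        rcases List.mem_append.mp hp with hp' | hp'
        · obtain ⟨h1, h2, h3⟩ := hF2 p hp'
          exact ⟨h1, by omega, h3⟩
        · have hpe : p = (m - lit.length, lit) := by simpa using hp'
          subst hpe
          refine ⟨hl, by simp; omega, ?_⟩
          intro t ht
          exact hpend t ht
    · intro p hp
      obtain ⟨h1, h2⟩ := hF3 p hp
      exact ⟨by omega, h2⟩
    · intro k hk
      rw [hlen'] at hk
      by_cases hsmall : k < m - lit.length
      · rcases hF4 k hsmall with ⟨p, hp, hb⟩ | ⟨p, hp, hb⟩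
        · refine Or.inl ⟨p, ?_, hb⟩
          by_cases hl : lit = [] <;> simp [flushR, hl, hp]
        · exact Or.inr ⟨p, hp, hb⟩
      · have hl : lit ≠ [] := by
          intro h0
          rw [h0] at hsmall
          simp at hsmall
          omega
        refine Or.inl ⟨(m - lit.length, lit), ?_, by simp; omega⟩
        simp [flushR, hl]
  | cons sg ss ih =>
    intro segsAll r cl lit m hlm hlen hlink hF2 hF3 hF4 hpend
    cases sg with
    | lit c =>
      rw [show groupFold (Seg.lit c :: ss) r cl lit m
            = groupFold ss r cl (lit ++ [c]) (m + 1) from rfl]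
      apply ih segsAll r cl (lit ++ [c]) (m + 1)
      · simp; omega
      · simp at hlen ⊢; omega
      · intro i hi
        have := hlink (i + 1) (by simpa using Nat.succ_lt_succ hi)
        rw [show m + (i + 1) = m + 1 + i from by omega] at this
        simpa using this
      · intro p hp
        obtain ⟨h1, h2, h3⟩ := hF2 p hp
        exact ⟨h1, by simp; omega, h3⟩
      · intro p hp
        obtain ⟨h1, h2⟩ := hF3 p hp
        exact ⟨by simp; omega, h2⟩
      · intro k hk
        exact hF4 k (by simp at hk; omega)
      · intro t ht
        have hL : (lit ++ [c]).length = lit.length + 1 := by simp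
        rw [hL] at ht ⊢
        by_cases htl : t < lit.length
        · have := hpend t htl
          rw [show m + 1 - (lit.length + 1) + t = m - lit.length + t from by omega]
          rw [List.getD_append _ _ _ _ htl]
          exact this
        · have hte : t = lit.length := by omega
          subst hte
          have h0 := hlink 0 (by simp)
          rw [show m + 1 - (lit.length + 1) + lit.length = m + 0 from by omega]
          rw [show (lit ++ [c]).getD lit.length ' ' = c from by
                simp [List.getD_eq_getElem?_getD]]
          simpa using h0
    | cls st =>
      rw [show groupFold (Seg.cls st :: ss) r cl lit m
            = groupFold ss (flushR r lit m) (cl ++ [(m, st)]) [] (m + 1) from rfl]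
      apply ih segsAll (flushR r lit m) (cl ++ [(m, st)]) [] (m + 1)
      · simp
      · simp at hlen ⊢; omega
      · intro i hi
        have := hlink (i + 1) (by simpa using Nat.succ_lt_succ hi)
        rw [show m + (i + 1) = m + 1 + i from by omega] at this
        simpa using this
      · intro p hp
        by_cases hl : lit = []
        · simp only [flushR, hl, if_true] at hp
          obtain ⟨h1, h2, h3⟩ := hF2 p hp
          exact ⟨h1, by simp only [List.length_nil]; omega, h3⟩
        · simp only [flushR, hl, if_false] at hp
          rcases List.mem_append.mp hp with hp' | hp'
          · obtain ⟨h1, h2, h3⟩ := hF2 p hp'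
            exact ⟨h1, by simp only [List.length_nil]; omega, h3⟩
          · have hpe : p = (m - lit.length, lit) := by simpa using hp'
            subst hpe
            refine ⟨hl, by simp; omega, ?_⟩
            intro t ht
            exact hpend t ht
      · intro p hp
        rcases List.mem_append.mp hp with hp' | hp'
        · obtain ⟨h1, h2⟩ := hF3 p hp'
          exact ⟨by simp only [List.length_nil]; omega, h2⟩
        · have hpe : p = (m, st) := by simpa using hp'
          subst hpe
          refine ⟨by simp only [List.length_nil]; omega, ?_⟩
          have h0 := hlink 0 (by simp)
          simpa using h0
      · intro k hk
        simp only [List.length_nil, Nat.sub_zero] at hk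
        by_cases hsmall : k < m - lit.length
        · rcases hF4 k hsmall with ⟨p, hp, hb⟩ | ⟨p, hp, hb⟩
          · refine Or.inl ⟨p, ?_, hb⟩
            by_cases hl : lit = [] <;> simp [flushR, hl, hp]
          · exact Or.inr ⟨p, by simp [hp], hb⟩
        · by_cases hkm : k = m
          · exact Or.inr ⟨(m, st), by simp, by omega⟩
          · have hl : lit ≠ [] := by
              intro h0
              rw [h0] at hsmall
              simp at hsmall
              omega
            refine Or.inl ⟨(m - lit.length, lit), ?_, by simp; omega⟩
            simp [flushR, hl]
      · intro t ht
        simp at ht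


-- index bookkeeping for prefixes of dropped lists
theorem getD_drop_char (l : List Char) (a t : Nat) (d : Char) :
    (l.drop a).getD t d = l.getD (a + t) d := by
  simp [List.getD_eq_getElem?_getD, List.getElem?_drop]

theorem prefix_drop_infix (s Y : List Char) (e : Nat) (h : s <+: Y.drop e) : s <:+: Y := by
  obtain ⟨t, ht⟩ := h
  obtain ⟨pre, hpre⟩ := Y.drop_suffix e
  exact ⟨pre, t, by rw [List.append_assoc, ht, hpre]⟩

-- if the whole window matches, the literal run (o, s) occurs at j + o
theorem run_prefix_of_W (hs : List Char) (segs : List Seg) (o : Nat) (s : List Char)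
    (hbound : o + s.length ≤ segs.length)
    (hchars : ∀ t, t < s.length → segs.getD (o + t) (Seg.lit ' ') = Seg.lit (s.getD t ' '))
    (j : Nat) (hjm : j + segs.length ≤ hs.length) (hW : W hs segs j) :
    s <+: hs.drop (j + o) := by
  rw [List.prefix_iff_eq_take]
  apply List.ext_getElem
  · simp; omega
  · intro t ht1 ht2
    have hts : t < s.length := ht1
    have hW' := hW (o + t) (by omega)
    rw [hchars t hts] at hW'
    simp only [segMatch, beq_iff_eq] at hW'
    have e1 : hs.getD (j + (o + t)) ' ' = hs[j + (o + t)]'(by omega) :=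
      List.getD_eq_getElem hs ' ' (by omega)
    have e2 : s.getD t ' ' = s[t]'hts := List.getD_eq_getElem s ' ' hts
    rw [e1, e2] at hW'
    rw [List.getElem_take, List.getElem_drop]
    have e3 : j + o + t = j + (o + t) := by omega
    simp_rw [e3]
    exact hW'.symm

-- verification of runs and classes is exactly the window predicate
theorem verify_iff (hs : List Char) (segs : List Seg)
    (runs : List (Nat × List Char)) (classes : List (Nat × PySem.Set Char))
    (hF2 : ∀ p ∈ runs, p.2 ≠ [] ∧ p.1 + p.2.length ≤ segs.length ∧
       ∀ t, t < p.2.length → segs.getD (p.1 + t) (Seg.lit ' ') = Seg.lit (p.2.getD t ' '))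
    (hF3 : ∀ p ∈ classes, p.1 < segs.length ∧ segs.getD p.1 (Seg.lit ' ') = Seg.cls p.2)
    (hF4 : ∀ k, k < segs.length →
       (∃ p ∈ runs, p.1 ≤ k ∧ k < p.1 + p.2.length) ∨ (∃ p ∈ classes, p.1 = k))
    (j : Nat) (hjm : j + segs.length ≤ hs.length) :
    ((runs.all (fun r => PySem.Chars.startswith (hs.drop (j + r.1)) r.2) &&
      classes.all (fun c => PySem.Set.contains c.2 (hs.getD (j + c.1) ' '))) = true)
      ↔ W hs segs j := by
  constructor
  · intro h k hk
    simp only [Bool.and_eq_true, List.all_eq_true] at h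
    obtain ⟨hruns, hcls⟩ := h
    rcases hF4 k hk with ⟨p, hp, hok, hkb⟩ | ⟨p, hp, hpk⟩
    · obtain ⟨hne, hbound, hchars⟩ := hF2 p hp
      have hsw := hruns p hp
      rw [PySem.Chars.startswith_iff] at hsw
      obtain ⟨u, hu⟩ := hsw
      have htlen : k - p.1 < p.2.length := by omega
      have hgoal : segMatch (segs.getD (p.1 + (k - p.1)) (Seg.lit ' '))
          (hs.getD (j + (p.1 + (k - p.1))) ' ') = true := by
        rw [hchars (k - p.1) htlen]
        have h1 : hs.getD (j + (p.1 + (k - p.1))) ' ' = (hs.drop (j + p.1)).getD (k - p.1) ' ' := by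
          rw [getD_drop_char]
          congr 1
          omega
        rw [h1, ← hu, List.getD_append _ _ _ _ htlen]
        simp [segMatch]
      have ek : p.1 + (k - p.1) = k := by omega
      rw [ek] at hgoal
      exact hgoal
    · obtain ⟨h1, h2⟩ := hF3 p hp
      have hc := hcls p hp
      rw [hpk] at h2 hc
      rw [h2]
      simpa [segMatch] using hc
  · intro hW
    simp only [Bool.and_eq_true, List.all_eq_true]
    refine ⟨?_, ?_⟩
    · intro p hp
      obtain ⟨hne, hbound, hchars⟩ := hF2 p hp
      rw [PySem.Chars.startswith_iff]
      exact run_prefix_of_W hs segs p.1 p.2 hbound hchars j hjm hW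
    · intro p hp
      obtain ⟨h1, h2⟩ := hF3 p hp
      have := hW p.1 h1
      rw [h2] at this
      simpa [segMatch] using this

-- A's search returns the first fitting window satisfying W
theorem find_first (hs : List Char) (segs : List Seg) (j0 : Nat)
    (hj0 : j0 + segs.length ≤ hs.length) (hW : W hs segs j0)
    (hprev : ∀ j, j < j0 → j + segs.length ≤ hs.length → ¬ W hs segs j) :
    (PySem.List.pyRange 0 ((hs.length : Int) - (segs.length : Int) + 1) 1).find?
      (fun i => matchesA hs segs i.toNat) = some ((j0 : Nat) : Int) := by
  rw [PySem.List.pyRange_one_append 0 ((j0 : Nat) : Int)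
        ((hs.length : Int) - (segs.length : Int) + 1) (by omega) (by omega)]
  rw [List.find?_append]
  have h1 : (PySem.List.pyRange 0 ((j0 : Nat) : Int) 1).find?
      (fun i => matchesA hs segs i.toNat) = none := by
    apply List.find?_eq_none.mpr
    intro i hi
    obtain ⟨h0, h1⟩ := (PySem.List.mem_pyRange_one).mp hi
    intro hMat
    exact hprev i.toNat (by omega) (by omega) ((matchesA_iff hs segs i.toNat).mp hMat)
  rw [h1, Option.none_or]
  rw [PySem.List.pyRange_one_cons (by omega)]
  apply List.find?_cons_of_pos
  show matchesA hs segs (((j0 : Nat) : Int)).toNat = true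
  rw [Int.toNat_natCast]
  exact (matchesA_iff hs segs _).mpr hW

-- the class-only scan returns what A's search returns
theorem class_loop_eq (hs : List Char) (segs : List Seg)
    (classes : List (Nat × PySem.Set Char)) (m : Nat)
    (hm1 : 1 ≤ m) (hmlen : m = segs.length)
    (hF3 : ∀ p ∈ classes, p.1 < segs.length ∧ segs.getD p.1 (Seg.lit ' ') = Seg.cls p.2)
    (hF4 : ∀ k, k < segs.length →
       (∃ p ∈ ([] : List (Nat × List Char)), p.1 ≤ k ∧ k < p.1 + p.2.length) ∨
       (∃ p ∈ classes, p.1 = k)) :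
    ∀ (fuel start : Nat), hs.length + 1 - start ≤ fuel →
    (∀ j, j < start → j + m ≤ hs.length → ¬ W hs segs j) →
    classLoop hs classes m fuel start =
      (match (PySem.List.pyRange 0 ((hs.length : Int) - (segs.length : Int) + 1) 1).find?
              (fun i => matchesA hs segs i.toNat) with
      | some i => i
      | none => -1) := by
  subst hmlen
  intro fuel
  induction fuel with
  | zero =>
    intro start hfuel hnf
    rw [find_none_end hs segs (fun j hj => hnf j (by omega) hj)]
    simp [classLoop]
  | succ fuel ih =>
    intro start hfuel hnf
    by_cases hin : start + segs.length ≤ hs.length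
    · rw [show classLoop hs classes segs.length (fuel + 1) start
            = (if classes.all (fun c => PySem.Set.contains c.2 (hs.getD (start + c.1) ' '))
               then (start : Int) else classLoop hs classes segs.length fuel (start + 1)) from by
          simp [classLoop, hin]]
      by_cases hv : classes.all (fun c => PySem.Set.contains c.2 (hs.getD (start + c.1) ' ')) = true
      · rw [if_pos hv]
        have hW : W hs segs start := by
          apply (verify_iff hs segs [] classes (by simp) hF3 hF4 start hin).mp
          simpa using hv
        rw [find_first hs segs start hin hW (fun j hj hfit => hnf j hj hfit)]
      · rw [if_neg hv]
        apply ih (start + 1) (by omega)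
        intro j hj hfit
        by_cases hjs : j < start
        · exact hnf j hjs hfit
        · have hje : j = start := by omega
          subst hje
          intro hW
          exact hv (by simpa using (verify_iff hs segs [] classes (by simp) hF3 hF4 j hin).mpr hW)
    · rw [show classLoop hs classes segs.length (fuel + 1) start = -1 from by
          simp [classLoop, hin]]
      rw [find_none_end hs segs (fun j hj => hnf j (by omega) hj)]

-- the anchored scan returns what A's search returns
theorem anchor_loop_eq (hs : List Char) (segs : List Seg)
    (runs : List (Nat × List Char)) (classes : List (Nat × PySem.Set Char))
    (m aoff : Nat) (astr : List Char)
    (hm1 : 1 ≤ m) (hmlen : m = segs.length)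
    (hF2 : ∀ p ∈ runs, p.2 ≠ [] ∧ p.1 + p.2.length ≤ segs.length ∧
       ∀ t, t < p.2.length → segs.getD (p.1 + t) (Seg.lit ' ') = Seg.lit (p.2.getD t ' '))
    (hF3 : ∀ p ∈ classes, p.1 < segs.length ∧ segs.getD p.1 (Seg.lit ' ') = Seg.cls p.2)
    (hF4 : ∀ k, k < segs.length →
       (∃ p ∈ runs, p.1 ≤ k ∧ k < p.1 + p.2.length) ∨ (∃ p ∈ classes, p.1 = k))
    (hanc : (aoff, astr) ∈ runs) :
    ∀ (fuel start : Nat), hs.length + 1 - start ≤ fuel →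
    (∀ j, j < start → j + m ≤ hs.length → ¬ W hs segs j) →
    anchorLoop hs runs classes m aoff astr fuel start =
      (match (PySem.List.pyRange 0 ((hs.length : Int) - (segs.length : Int) + 1) 1).find?
              (fun i => matchesA hs segs i.toNat) with
      | some i => i
      | none => -1) := by
  subst hmlen
  obtain ⟨hane, hanb, hanchars⟩ := hF2 (aoff, astr) hanc
  have hal : 1 ≤ astr.length := by
    cases astr with
    | nil => exact absurd rfl hane
    | cons a t => simp
  intro fuel
  induction fuel with
  | zero =>
    intro start hfuel hnf
    rw [find_none_end hs segs (fun j hj => hnf j (by omega) hj)]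
    simp [anchorLoop]
  | succ fuel ih =>
    intro start hfuel hnf
    by_cases hin : start + segs.length ≤ hs.length
    · have hk0 : start + aoff ≤ hs.length := by omega
      rw [show anchorLoop hs runs classes segs.length aoff astr (fuel + 1) start
            = (if PySem.Chars.findFrom hs astr ((start + aoff : Nat) : Int) none = -1 then -1
               else if hs.length <
                   (PySem.Chars.findFrom hs astr ((start + aoff : Nat) : Int) none - (aoff : Int)).toNat
                     + segs.length then -1
               else if (runs.all (fun r => PySem.Chars.startswith
                          (hs.drop ((PySem.Chars.findFrom hs astr ((start + aoff : Nat) : Int) none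
                            - (aoff : Int)).toNat + r.1)) r.2) &&
                        classes.all (fun c => PySem.Set.contains c.2
                          (hs.getD ((PySem.Chars.findFrom hs astr ((start + aoff : Nat) : Int) none
                            - (aoff : Int)).toNat + c.1) ' ')))
               then (((PySem.Chars.findFrom hs astr ((start + aoff : Nat) : Int) none
                       - (aoff : Int)).toNat : Nat) : Int)
               else anchorLoop hs runs classes segs.length aoff astr fuel
                      ((PySem.Chars.findFrom hs astr ((start + aoff : Nat) : Int) none
                        - (aoff : Int)).toNat + 1)) from by
            simp [anchorLoop, hin]]
      set q : Int := PySem.Chars.findFrom hs astr ((start + aoff : Nat) : Int) none with hqdef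
      by_cases hp : q = -1
      · rw [if_pos hp]
        have hnone : ∀ j, j + segs.length ≤ hs.length → ¬ W hs segs j := by
          intro j hj hW
          by_cases hjs : j < start
          · exact hnf j hjs hj hW
          · have hpre := run_prefix_of_W hs segs aoff astr hanb hanchars j hj hW
            have hinf : astr <:+: hs.drop (start + aoff) := by
              have e : j + aoff = (start + aoff) + (j - start) := by omega
              rw [e, ← List.drop_drop] at hpre
              exact prefix_drop_infix astr (hs.drop (start + aoff)) (j - start) hpre
            exact ((PySem.Chars.findFrom_natCast_eq_neg_one_iff hs astr (start + aoff) hk0).mp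
              (hqdef ▸ hp)) hinf
        rw [find_none_end hs segs hnone]
      · rw [if_neg hp]
        obtain ⟨hkle, hqpre, hmin⟩ :=
          PySem.Chars.findFrom_natCast_spec hs astr (start + aoff) hk0 (hqdef ▸ hp)
        rw [← hqdef] at hkle hqpre hmin
        have hq0 : (0 : Int) ≤ q := le_trans (by positivity) hkle
        have hqa : (aoff : Int) ≤ q := by
          have h' : ((start + aoff : Nat) : Int) ≤ q := hkle
          omega
        have hjq : (q - (aoff : Int)).toNat + aoff = q.toNat := by omega
        have hjs : start ≤ (q - (aoff : Int)).toNat := by omega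
        by_cases hbig : hs.length < (q - (aoff : Int)).toNat + segs.length
        · rw [if_pos hbig]
          have hnone : ∀ j', j' + segs.length ≤ hs.length → ¬ W hs segs j' := by
            intro j' hj' hW
            by_cases hjs' : j' < start
            · exact hnf j' hjs' hj' hW
            · have hpre := run_prefix_of_W hs segs aoff astr hanb hanchars j' hj' hW
              exact hmin (j' + aoff) (by omega) (by omega) hpre
          rw [find_none_end hs segs hnone]
        · rw [if_neg hbig]
          have hprev : ∀ j', j' < (q - (aoff : Int)).toNat → j' + segs.length ≤ hs.length →
              ¬ W hs segs j' := by
            intro j' hlt hj' hW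
            by_cases hjs' : j' < start
            · exact hnf j' hjs' hj' hW
            · have hpre := run_prefix_of_W hs segs aoff astr hanb hanchars j' hj' hW
              exact hmin (j' + aoff) (by omega) (by omega) hpre
          by_cases hv : (runs.all (fun r => PySem.Chars.startswith
                (hs.drop ((q - (aoff : Int)).toNat + r.1)) r.2) &&
              classes.all (fun c => PySem.Set.contains c.2
                (hs.getD ((q - (aoff : Int)).toNat + c.1) ' '))) = true
          · rw [if_pos hv]
            have hW : W hs segs (q - (aoff : Int)).toNat :=
              (verify_iff hs segs runs classes hF2 hF3 hF4 (q - (aoff : Int)).toNat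
                (by omega)).mp hv
            rw [find_first hs segs (q - (aoff : Int)).toNat (by omega) hW hprev]
          · rw [if_neg hv]
            apply ih ((q - (aoff : Int)).toNat + 1) (by omega)
            intro j' hlt hfit
            by_cases hcase : j' < (q - (aoff : Int)).toNat
            · exact hprev j' hcase hfit
            · have hje : j' = (q - (aoff : Int)).toNat := by omega
              intro hW
              exact hv ((verify_iff hs segs runs classes hF2 hF3 hF4
                ((q - (aoff : Int)).toNat) (by omega)).mpr (hje ▸ hW))
    · rw [show anchorLoop hs runs classes segs.length aoff astr (fuel + 1) start = -1 from by
          simp [anchorLoop, hin]]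
      rw [find_none_end hs segs (fun j hj => hnf j (by omega) hj)]

-- ===== VERDICT (by name: the statement is the Claim_ definition above) =====
theorem enhanced_strstr_spec : Claim_equal_enhanced_strstr := by
  intro hay nee _
  unfold Spec_enhanced_strstr
  show enhanced_strstr hay nee = enhanced_strstr_alt hay nee
  have hpg := (parseB2_eq_groupFold nee.toList.length nee.toList le_rfl).1 [] [] [] 0
  have hspec := groupFold_spec (parseA nee.toList) (parseA nee.toList) [] [] [] 0
    (by simp) (by simp) (fun i hi => by simp) (by simp) (by simp) (by simp) (by simp)
  rw [← hpg] at hspec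
  obtain ⟨hm, hF2, hF3, hF4⟩ := hspec
  simp only [enhanced_strstr, enhanced_strstr_alt]
  by_cases hm0 : (parseA nee.toList).length = 0
  · rw [if_pos (by rw [hm]; exact hm0)]
    have hpat : parseA nee.toList = [] := List.length_eq_zero_iff.mp hm0
    rw [hpat]
    rw [show ((hay.toList.length : Int) - (([] : List Seg).length : Int) + 1)
          = (hay.toList.length : Int) + 1 from by simp]
    rw [PySem.List.pyRange_one_cons (by positivity)]
    rw [List.find?_cons_of_pos (p := fun i : Int => matchesA hay.toList [] i.toNat)
          (by simp [matchesA])]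
  · rw [if_neg (by rw [hm]; exact hm0)]
    rcases hrs : (parseB2 nee.toList [] [] [] none 0).1 with _ | ⟨⟨aoff, astr⟩, rest⟩
    · have hF4' := hF4
      rw [hrs] at hF4'
      exact (class_loop_eq hay.toList (parseA nee.toList)
        (parseB2 nee.toList [] [] [] none 0).2.1 (parseB2 nee.toList [] [] [] none 0).2.2
        (by rw [hm]; omega) hm hF3 hF4'
        (hay.toList.length + 1) 0 (by omega)
        (fun j hj _ => absurd hj (Nat.not_lt_zero j))).symm
    · have hF2' := hF2
      have hF4' := hF4
      rw [hrs] at hF2' hF4'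
      exact (anchor_loop_eq hay.toList (parseA nee.toList) ((aoff, astr) :: rest)
        (parseB2 nee.toList [] [] [] none 0).2.1 (parseB2 nee.toList [] [] [] none 0).2.2
        aoff astr (by rw [hm]; omega) hm hF2' hF3 hF4'
        (List.mem_cons_self)
        (hay.toList.length + 1) 0 (by omega)
        (fun j hj _ => absurd hj (Nat.not_lt_zero j))).symm
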